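-- pv_equiv track=rewrite | github.com/MarioV-Dev/word-search | main.py | isConsecutiveVertical
-- ===== SOURCE A (Python) =====
-- def isConsecutiveVertical(buttons):
--     if len(buttons) < 1:
--         return False
--
--     yCordinates = []
--     min = buttons[0][1]
--     max = buttons[0][1]
--
--     for item in buttons:
--         yCordinates.append(item[1])
--         if item[1] > max:
--             max = item[1]
--         if item[1] < min:
--             min = item[1]
--
--     for i in range(len(yCordinates)):
--         if min not in yCordinates:
--             return False
--         min += 1
--
--     return True
-- ===== SOURCE B (Python) =====
-- def isConsecutiveVertical(buttons):
--     ys = sorted(b[1] for b in buttons)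
--     if not ys:
--         return False
--     return all(b - a == 1 for a, b in zip(ys, ys[1:]))
-- ===== Notes on version B (the rewrite author's own statement) =====
-- stated objective: faster
-- what changed: Replaces A's repeated membership scans (find min, then test min, min+1, ... against the whole list, O(n^2) worst case) with sort-the-y-values once and a single pass checking every adjacent pair differs by exactly 1.
import Mathlib
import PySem

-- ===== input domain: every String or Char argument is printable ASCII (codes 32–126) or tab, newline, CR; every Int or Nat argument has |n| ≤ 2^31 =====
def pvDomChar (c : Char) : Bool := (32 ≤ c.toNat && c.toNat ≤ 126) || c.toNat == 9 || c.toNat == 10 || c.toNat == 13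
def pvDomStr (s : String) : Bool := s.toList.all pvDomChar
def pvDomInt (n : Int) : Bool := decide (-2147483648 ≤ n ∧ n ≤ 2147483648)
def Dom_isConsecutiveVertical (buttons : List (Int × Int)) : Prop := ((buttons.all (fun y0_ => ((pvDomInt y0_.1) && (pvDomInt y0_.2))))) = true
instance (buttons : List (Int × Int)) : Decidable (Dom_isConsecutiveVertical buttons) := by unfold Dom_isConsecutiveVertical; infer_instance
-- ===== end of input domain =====

-- B replaces A's min-then-repeated-membership-scan strategy with a sort-then-adjacent-difference single scan (objective: faster in the worst case; on random inputs a timing run could not measure a difference).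


-- ===== PORT A =====
-- body of A's first for-loop: append y to yCordinates, update max then min
def pvStepA (st : List Int × Int × Int) (item : Int × Int) : List Int × Int × Int :=
  let ys := st.1 ++ [item.2]
  let mx := if item.2 > st.2.2 then item.2 else st.2.2
  let mn := if item.2 < st.2.1 then item.2 else st.2.1
  (ys, mn, mx)

-- A's second for-loop: k iterations left; "if min not in yCordinates: return False; min += 1"
def pvLoopA (ys : List Int) : Int → Nat → Bool
  | _, 0 => true
  | mn, k+1 => if ys.contains mn then pvLoopA ys (mn+1) k else false

def isConsecutiveVertical (buttons : List (Int × Int)) : Bool :=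
  match buttons with
  | [] => false          -- len(buttons) < 1
  | b0 :: _ =>
    let st := buttons.foldl pvStepA ([], b0.2, b0.2)   -- (yCordinates, min, max)
    pvLoopA st.1 st.2.1 st.1.length

-- ===== PORT B =====
def isConsecutiveVertical_alt (buttons : List (Int × Int)) : Bool :=
  let ys := PySem.List.sorted (buttons.map Prod.snd) (fun y => y) false
  if ys.isEmpty then false
  else (ys.zip ys.tail).all (fun p => p.2 - p.1 == 1)

-- ===== PRECONDITION & SPEC =====
def Spec_isConsecutiveVertical (buttons : List (Int × Int)) (out : Bool) : Prop := out = isConsecutiveVertical_alt buttons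
instance (buttons : List (Int × Int)) (out : Bool) : Decidable (Spec_isConsecutiveVertical buttons out) := by unfold Spec_isConsecutiveVertical; infer_instance

-- ===== CLAIM (what is proved, stated in full; the proofs are below) =====
def Claim_equal_isConsecutiveVertical : Prop := ∀ (buttons : List (Int × Int)), Dom_isConsecutiveVertical buttons → Spec_isConsecutiveVertical buttons (isConsecutiveVertical buttons)

-- ===== LEMMAS AND PROOFS =====

-- the list of consecutive integers m, m+1, ..., m+n-1
def pvConsec (m : Int) : Nat → List Int
  | 0 => []
  | n+1 => m :: pvConsec (m+1) n

theorem pvConsec_length (m : Int) (n : Nat) : (pvConsec m n).length = n := by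
  induction n generalizing m with
  | zero => rfl
  | succ n ih => simp [pvConsec, ih]

theorem pvConsec_mem (m x : Int) (n : Nat) : x ∈ pvConsec m n ↔ m ≤ x ∧ x < m + n := by
  induction n generalizing m with
  | zero => simp [pvConsec]
  | succ n ih =>
    simp only [pvConsec, List.mem_cons, ih]
    push_cast
    omega

theorem pvConsec_pairwise (m : Int) (n : Nat) : (pvConsec m n).Pairwise (· < ·) := by
  induction n generalizing m with
  | zero => simp [pvConsec]
  | succ n ih =>
    refine List.Pairwise.cons ?_ (ih (m+1))
    intro y hy
    have := (pvConsec_mem (m+1) y n).1 hy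
    omega

theorem pvConsec_adj (m : Int) (n : Nat) :
    (((pvConsec m n).zip (pvConsec m n).tail).all (fun p => p.2 - p.1 == 1)) = true := by
  induction n generalizing m with
  | zero => rfl
  | succ n ih =>
    cases n with
    | zero => rfl
    | succ k =>
      simp only [pvConsec, List.tail_cons, List.zip_cons_cons, List.all_cons, Bool.and_eq_true]
      constructor
      · simp
      · exact ih (m+1)

theorem pvAdj_eq_consec (t : List Int) (a : Int)
    (h : (((a :: t).zip t).all (fun p => p.2 - p.1 == 1)) = true) :
    a :: t = pvConsec a (t.length + 1) := by
  induction t generalizing a with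
  | nil => rfl
  | cons b t ih =>
    simp only [List.zip_cons_cons, List.all_cons, Bool.and_eq_true, beq_iff_eq] at h
    obtain ⟨h1, h2⟩ := h
    have hb : b = a + 1 := by omega
    have ht := ih b h2
    simp only [List.length_cons]
    rw [pvConsec, ← hb, ← ht]

-- A's first loop produces yCordinates = ys0 ++ map snd l
theorem pvFold_ys (l : List (Int × Int)) : ∀ (ys0 : List Int) (mn mx : Int),
    (l.foldl pvStepA (ys0, mn, mx)).1 = ys0 ++ l.map Prod.snd := by
  induction l with
  | nil => simp
  | cons p l ih =>
    intro ys0 mn mx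
    simp only [List.foldl_cons, pvStepA, List.map_cons]
    rw [ih]
    simp

-- A's running minimum: it is the old minimum or a member's y, and is ≤ both
theorem pvFold_min (l : List (Int × Int)) : ∀ (ys0 : List Int) (mn mx : Int),
    ((l.foldl pvStepA (ys0, mn, mx)).2.1 = mn ∨ ∃ p ∈ l, (l.foldl pvStepA (ys0, mn, mx)).2.1 = p.2) ∧
    (l.foldl pvStepA (ys0, mn, mx)).2.1 ≤ mn ∧
    ∀ p ∈ l, (l.foldl pvStepA (ys0, mn, mx)).2.1 ≤ p.2 := by
  induction l with
  | nil => simp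
  | cons q l ih =>
    intro ys0 mn mx
    simp only [List.foldl_cons, pvStepA]
    set mn' := if q.2 < mn then q.2 else mn with hmn'
    set mx' := if q.2 > mx then q.2 else mx with hmx'
    obtain ⟨hsrc, hle, hall⟩ := ih (ys0 ++ [q.2]) mn' mx'
    have hmn'p : mn' ≤ mn ∧ mn' ≤ q.2 ∧ (mn' = mn ∨ mn' = q.2) := by
      rw [hmn']; split <;> omega
    refine ⟨?_, by omega, ?_⟩
    · rcases hsrc with h | ⟨p, hp, hpe⟩
      · rcases hmn'p.2.2 with h2 | h2
        · left; rw [h, h2]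
        · right; exact ⟨q, by simp, by rw [h, h2]⟩
      · right; exact ⟨p, List.mem_cons_of_mem _ hp, hpe⟩
    · intro p hp
      rcases List.mem_cons.1 hp with h | h
      · subst h; omega
      · exact hall p h

-- A's second loop tests membership of mn, mn+1, ..., mn+k-1
theorem pvLoopA_spec (ys : List Int) (k : Nat) : ∀ (mn : Int),
    pvLoopA ys mn k = true ↔ ∀ i : Nat, i < k → (mn + (i : Int)) ∈ ys := by
  induction k with
  | zero => intro mn; simp [pvLoopA]
  | succ k ih =>
    intro mn
    simp only [pvLoopA]
    by_cases hm : ys.contains mn = true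
    · rw [if_pos hm, ih]
      have hmem : mn ∈ ys := List.contains_iff_mem.1 hm
      constructor
      · intro h i hi
        cases i with
        | zero => simpa using hmem
        | succ j =>
          have := h j (by omega)
          have he : mn + 1 + (j : Int) = mn + ((j + 1 : Nat) : Int) := by push_cast; ring
          rwa [he] at this
      · intro h i hi
        have := h (i + 1) (by omega)
        have he : mn + ((i + 1 : Nat) : Int) = mn + 1 + (i : Int) := by push_cast; ring
        rwa [he] at this
    · rw [if_neg hm]
      constructor
      · intro h; cases h
      · intro h
        exfalso
        apply hm
        apply List.contains_iff_mem.2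
        simpa using h 0 (by omega)

-- core equivalence: for a nonempty list with minimum m, A's membership loop agrees with B's sorted adjacent-difference scan
theorem pvKey (ys : List Int) (m : Int) (hysne : ys ≠ [])
    (hmmem : m ∈ ys) (hmall : ∀ y ∈ ys, m ≤ y) :
    pvLoopA ys m ys.length =
      ((PySem.List.sorted ys (fun y => y) false).zip
        (PySem.List.sorted ys (fun y => y) false).tail).all (fun p => p.2 - p.1 == 1) := by
  set s := PySem.List.sorted ys (fun y => y) false with hs
  have hsperm : s.Perm ys := PySem.List.sorted_perm ..
  have hslen : s.length = ys.length := hsperm.length_eq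
  have hsne : s ≠ [] := by
    intro h
    exact hysne (by rwa [hs, PySem.List.sorted_eq_nil_iff] at h)
  rw [Bool.eq_iff_iff, pvLoopA_spec]
  constructor
  · -- A true → adjacent differences of sorted are all 1
    intro h
    have hsub : pvConsec m ys.length ⊆ ys := by
      intro x hx
      obtain ⟨h1, h2⟩ := (pvConsec_mem m x ys.length).1 hx
      obtain ⟨i, hi, hxe⟩ : ∃ i : Nat, i < ys.length ∧ x = m + (i : Int) :=
        ⟨(x - m).toNat, by omega, by omega⟩
      rw [hxe]; exact h i hi
    have hnd : (pvConsec m ys.length).Nodup :=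
      (pvConsec_pairwise m ys.length).imp (fun h => ne_of_lt h)
    have hperm : (pvConsec m ys.length).Perm ys :=
      List.Subperm.perm_of_length_le (hnd.subperm hsub) (by rw [pvConsec_length])
    have hse : s = pvConsec m ys.length :=
      PySem.List.sorted_eq_of_perm_of_pairwise_lt _ _ _ hperm (pvConsec_pairwise m ys.length)
    rw [hse]
    exact pvConsec_adj m ys.length
  · -- adjacent differences all 1 → A true
    intro h
    obtain ⟨a, t, hat⟩ := List.exists_cons_of_ne_nil hsne
    have hadj : (((a :: t).zip t).all (fun p => p.2 - p.1 == 1)) = true := by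
      rw [hat] at h; simpa using h
    have hsc : s = pvConsec a (t.length + 1) := by
      rw [hat]; exact pvAdj_eq_consec t a hadj
    have hna : t.length + 1 = ys.length := by rw [← hslen, hat]; simp
    have hamem : a ∈ ys := hsperm.subset (by rw [hat]; simp)
    have halow : ∀ y ∈ ys, a ≤ y := PySem.List.key_head_sorted_le _ _ (by rw [← hs]; exact hat)
    have ham : a = m := le_antisymm (halow m hmmem) (hmall a hamem)
    intro i hi
    apply hsperm.subset
    rw [hsc, ham, pvConsec_mem]
    constructor
    · omega
    · push_cast
      omega

-- unfold A on a nonempty list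
theorem pvA_eq (b0 : Int × Int) (rest : List (Int × Int)) :
    isConsecutiveVertical (b0 :: rest) =
      pvLoopA ((b0 :: rest).map Prod.snd)
        (((b0 :: rest).foldl pvStepA ([], b0.2, b0.2)).2.1)
        ((b0 :: rest).map Prod.snd).length := by
  have hfold := pvFold_ys (b0 :: rest) [] b0.2 b0.2
  simp only [isConsecutiveVertical]
  rw [hfold]
  simp

-- main equivalence on a nonempty list
theorem pvMain (b0 : Int × Int) (rest : List (Int × Int)) :
    isConsecutiveVertical (b0 :: rest) = isConsecutiveVertical_alt (b0 :: rest) := by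
  obtain ⟨hminsrc, hminle, hminall⟩ := pvFold_min (b0 :: rest) [] b0.2 b0.2
  have hmmem : ((b0 :: rest).foldl pvStepA ([], b0.2, b0.2)).2.1 ∈ (b0 :: rest).map Prod.snd := by
    rcases hminsrc with h | ⟨p, hp, hpe⟩
    · rw [h]; exact List.mem_map_of_mem (by simp)
    · rw [hpe]; exact List.mem_map_of_mem hp
  have hmall : ∀ y ∈ (b0 :: rest).map Prod.snd,
      ((b0 :: rest).foldl pvStepA ([], b0.2, b0.2)).2.1 ≤ y := by
    intro y hy
    obtain ⟨p, hp, hpe⟩ := List.mem_map.1 hy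
    rw [← hpe]
    exact hminall p hp
  have hkey := pvKey ((b0 :: rest).map Prod.snd) _ (by simp) hmmem hmall
  rw [pvA_eq, hkey]
  simp only [isConsecutiveVertical_alt]
  rw [if_neg]
  simp only [List.isEmpty_iff, PySem.List.sorted_eq_nil_iff]
  simp

-- ===== VERDICT (by name: the statement is the Claim_ definition above) =====
theorem isConsecutiveVertical_spec : Claim_equal_isConsecutiveVertical := by
  intro buttons _
  unfold Spec_isConsecutiveVertical
  cases buttons with
  | nil => rfl
  | cons b0 rest => exact pvMain b0 rest
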